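-- pv_equiv track=rewrite | github.com/iioSnail/quant | utils/utils.py | dict_change_place
-- ===== SOURCE A (Python) =====
-- def dict_change_place(old_dict: dict, key: str, after_key: str):
--     """
--     修改dict中key的位置，将`key`放到`after_key`后面
--     """
--     if key not in old_dict:
--         raise RuntimeError("Key“%s”不在dict中" % key)
--
--     if after_key not in old_dict:
--         raise RuntimeError("Key“%s”不在dict中" % after_key)
--
--     new_dict = {}
--     for k in old_dict.keys():
--         if k == after_key:
--             new_dict[k] = old_dict[k]
--             new_dict[key] = old_dict[key]
--             continue
--
--         if k == key:
--             continue
--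
--         new_dict[k] = old_dict[k]
--
--     return new_dict
-- ===== SOURCE B (Python) =====
-- def dict_change_place(old_dict: dict, key: str, after_key: str):
--     """
--     Move `key` to the position right after `after_key` (rebuild via an explicit key list).
--     """
--     if key not in old_dict:
--         raise RuntimeError("Key“%s”不在dict中" % key)
--
--     if after_key not in old_dict:
--         raise RuntimeError("Key“%s”不在dict中" % after_key)
--
--     if key == after_key:
--         return dict(old_dict)
--
--     keys = [k for k in old_dict if k != key]
--     keys.insert(keys.index(after_key) + 1, key)
--     return {k: old_dict[k] for k in keys}
-- ===== Notes on version B (the rewrite author's own statement) =====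
-- stated objective: simpler
-- what changed: Instead of a single dict-building loop with continue branches, B computes the new key ordering explicitly (drop key from the key list, insert it after after_key's index) and rebuilds the dict with one comprehension; key == after_key is handled up front as a no-op copy.
import Mathlib
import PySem

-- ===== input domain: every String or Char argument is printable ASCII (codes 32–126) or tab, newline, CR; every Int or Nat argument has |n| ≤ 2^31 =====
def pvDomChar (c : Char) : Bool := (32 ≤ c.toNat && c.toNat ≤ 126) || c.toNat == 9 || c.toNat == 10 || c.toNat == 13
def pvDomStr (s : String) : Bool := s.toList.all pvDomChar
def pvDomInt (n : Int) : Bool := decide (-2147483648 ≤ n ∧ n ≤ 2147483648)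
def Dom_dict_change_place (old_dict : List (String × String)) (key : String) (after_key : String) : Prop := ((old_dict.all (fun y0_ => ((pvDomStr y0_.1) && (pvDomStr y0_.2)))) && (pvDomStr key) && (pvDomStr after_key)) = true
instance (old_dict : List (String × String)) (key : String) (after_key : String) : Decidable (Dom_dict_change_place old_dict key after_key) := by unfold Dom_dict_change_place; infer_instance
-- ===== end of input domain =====

-- B rebuilds the dict from an explicitly reordered key list instead of A's single
-- dict-building loop with continue branches (objective: simpler decomposition).

-- ===== PORT A =====
def dict_change_place (old_dict : List (String × String)) (key : String) (after_key : String) : List (String × String) :=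
  let od : PySem.Dict String String := PySem.Dict.mk old_dict
  (od.keys.foldl (fun new_dict k =>
      if k == after_key then
        (new_dict.insert k (od.getD k "")).insert key (od.getD key "")
      else if k == key then
        new_dict
      else
        new_dict.insert k (od.getD k "")) PySem.Dict.empty).items

-- ===== PORT B =====
def dict_change_place_alt (old_dict : List (String × String)) (key : String) (after_key : String) : List (String × String) :=
  let od : PySem.Dict String String := PySem.Dict.mk old_dict
  if key == after_key then
    old_dict
  else
    let ks := od.keys.filter (fun k => !(k == key))
    -- keys.insert(keys.index(after_key) + 1, key); under Pre_ the index? is some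
    let ks2 := PySem.List.insert ks ((((PySem.List.index? ks after_key).getD 0) + 1 : Nat) : Int) key
    ks2.map (fun k => (k, od.getD k ""))

-- ===== PRECONDITION & SPEC =====
-- Pre_: both keys present (otherwise A raises RuntimeError); duplicate-key lists are
-- excluded because a Python dict has unique keys, so such lists represent no Python input.
def Pre_dict_change_place (old_dict : List (String × String)) (key : String) (after_key : String) : Prop :=
  key ∈ old_dict.map Prod.fst ∧ after_key ∈ old_dict.map Prod.fst ∧ (old_dict.map Prod.fst).Nodup
instance (old_dict : List (String × String)) (key : String) (after_key : String) : Decidable (Pre_dict_change_place old_dict key after_key) := by unfold Pre_dict_change_place; infer_instance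

def pvWitness_dict_change_place : (List (String × String)) × String × String :=
  ([("a", "1"), ("b", "2"), ("c", "3")], "a", "b")

def Spec_dict_change_place (old_dict : List (String × String)) (key : String) (after_key : String) (out : List (String × String)) : Prop := out = dict_change_place_alt old_dict key after_key
instance (old_dict : List (String × String)) (key : String) (after_key : String) (out : List (String × String)) : Decidable (Spec_dict_change_place old_dict key after_key out) := by unfold Spec_dict_change_place; infer_instance

-- ===== CLAIM (what is proved, stated in full; the proofs are below) =====
def Claim_equal_dict_change_place : Prop := ∀ (old_dict : List (String × String)) (key : String) (after_key : String), Dom_dict_change_place old_dict key after_key → Pre_dict_change_place old_dict key after_key → Spec_dict_change_place old_dict key after_key (dict_change_place old_dict key after_key)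

-- ===== LEMMAS AND PROOFS =====

-- the per-key contribution to the reordered key list (key ≠ after_key case)
def pvFk (key after_key k : String) : List String :=
  if k = after_key then [after_key, key] else if k = key then [] else [k]

-- A's fold, characterized (key ≠ after_key): it appends the pvFk blocks in key order.
theorem pvFoldA (od : PySem.Dict String String) (key after_key : String)
    (hne : key ≠ after_key) :
    ∀ (l : List String) (acc : PySem.Dict String String), l.Nodup →
      (∀ k ∈ l, k ≠ key → k ∉ acc.keys) → (after_key ∈ l → key ∉ acc.keys) →
      (l.foldl (fun new_dict k =>
          if k == after_key then
            (new_dict.insert k (od.getD k "")).insert key (od.getD key "")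
          else if k == key then new_dict
          else new_dict.insert k (od.getD k "")) acc).items
        = acc.items ++ (l.flatMap (pvFk key after_key)).map (fun k => (k, od.getD k "")) := by
  intro l
  induction l with
  | nil => intro acc _ _ _; simp
  | cons h t ih =>
    intro acc hnd hd hk
    have hndt : t.Nodup := hnd.of_cons
    have hht : h ∉ t := (List.nodup_cons.mp hnd).1
    by_cases hha : h = after_key
    · subst hha
      have hhk : h ∉ acc.keys := hd h (by simp) (fun e => hne e.symm)
      have hkk : key ∉ acc.keys := hk (by simp)
      have hc1 : acc.contains h = false := by
        cases hc : acc.contains h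
        · rfl
        · exact absurd ((PySem.Dict.contains_iff_mem_keys _ _).mp hc) hhk
      have hi1 : (acc.insert h (od.getD h "")).items = acc.items ++ [(h, od.getD h "")] :=
        PySem.Dict.items_insert_of_not_contains _ _ hc1
      have hk1 : (acc.insert h (od.getD h "")).keys = acc.keys ++ [h] := by
        simp [PySem.Dict.keys, hi1]
      have hc2 : (acc.insert h (od.getD h "")).contains key = false := by
        cases hc : (acc.insert h (od.getD h "")).contains key
        · rfl
        · have := (PySem.Dict.contains_iff_mem_keys _ _).mp hc
          rw [hk1] at this
          rcases List.mem_append.mp this with hm | hm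
          · exact absurd hm hkk
          · exact absurd (List.mem_singleton.mp hm) hne
      have hi2 : ((acc.insert h (od.getD h "")).insert key (od.getD key "")).items
          = acc.items ++ [(h, od.getD h ""), (key, od.getD key "")] := by
        rw [PySem.Dict.items_insert_of_not_contains _ _ hc2, hi1]; simp
      have hk2 : ((acc.insert h (od.getD h "")).insert key (od.getD key "")).keys
          = acc.keys ++ [h, key] := by
        simp [PySem.Dict.keys, hi2]
      rw [List.foldl_cons, if_pos (by simp)]
      rw [ih _ hndt
        (by intro k hkt hkne
            rw [hk2]
            simp only [List.mem_append, not_or]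
            exact ⟨hd k (by simp [hkt]) hkne, by
              simp only [List.mem_cons, not_or]
              exact ⟨fun e => hht (e ▸ hkt), fun e => hkne (by simpa using e), by simp⟩⟩)
        (fun hmem => absurd hmem hht), hi2]
      simp [pvFk]
    · by_cases hhkey : h = key
      · subst hhkey
        rw [List.foldl_cons, if_neg (by simpa using hha), if_pos (by simp)]
        rw [ih _ hndt (fun k hkt hkne => hd k (by simp [hkt]) hkne)
          (fun hmem => hk (by simp [hmem]))]
        simp [pvFk, hha]
      · have hhm : h ∉ acc.keys := hd h (by simp) hhkey
        have hc1 : acc.contains h = false := by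
          cases hc : acc.contains h
          · rfl
          · exact absurd ((PySem.Dict.contains_iff_mem_keys _ _).mp hc) hhm
        have hi1 : (acc.insert h (od.getD h "")).items = acc.items ++ [(h, od.getD h "")] :=
          PySem.Dict.items_insert_of_not_contains _ _ hc1
        have hk1 : (acc.insert h (od.getD h "")).keys = acc.keys ++ [h] := by
          simp [PySem.Dict.keys, hi1]
        rw [List.foldl_cons, if_neg (by simpa using hha), if_neg (by simpa using hhkey)]
        rw [ih _ hndt
          (by intro k hkt hkne
              rw [hk1]
              simp only [List.mem_append, List.mem_singleton, not_or]
              exact ⟨hd k (by simp [hkt]) hkne, fun e => hht (e ▸ hkt)⟩)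
          (by intro hmem
              rw [hk1]
              simp only [List.mem_append, List.mem_singleton, not_or]
              exact ⟨hk (by simp [hmem]), hhkey ∘ Eq.symm⟩), hi1]
        simp [pvFk, hha, hhkey]

-- with after_key not around, pvFk is just "drop key"
theorem pvFlatMap_filter (key after_key : String) :
    ∀ (l : List String), after_key ∉ l →
      l.flatMap (pvFk key after_key) = l.filter (fun k => !(k == key)) := by
  intro l
  induction l with
  | nil => intro _; rfl
  | cons h t ih =>
    intro hmem
    have hha : h ≠ after_key := fun e => hmem (by simp [e])
    by_cases hhk : h = key
    · subst hhk
      simp [pvFk, hha, ih (fun m => hmem (by simp [m]))]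
    · simp [pvFk, hha, hhk, ih (fun m => hmem (by simp [m]))]

-- B's key list, characterized: filter-then-insert equals the pvFk blocks.
theorem pvKeyList (key after_key : String) (hne : key ≠ after_key) :
    ∀ (l : List String), l.Nodup → after_key ∈ l →
      PySem.List.insert (l.filter (fun k => !(k == key)))
          ((((PySem.List.index? (l.filter (fun k => !(k == key))) after_key).getD 0) + 1 : Nat) : Int) key
        = l.flatMap (pvFk key after_key) := by
  intro l
  induction l with
  | nil => intro _ h; exact absurd h (by simp)
  | cons h t ih =>
    intro hnd hmem
    have hndt : t.Nodup := hnd.of_cons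
    have hht : h ∉ t := (List.nodup_cons.mp hnd).1
    by_cases hhk : h = key
    · have hat : after_key ∈ t := by
        rcases List.mem_cons.mp hmem with e | m
        · exact absurd (e.trans hhk).symm hne
        · exact m
      have hf : List.filter (fun k => !(k == key)) (h :: t)
          = List.filter (fun k => !(k == key)) t := by simp [hhk]
      rw [List.flatMap_cons, show pvFk key after_key h = [] by simp [pvFk, hhk, hne],
        List.nil_append, hf]
      exact ih hndt hat
    · have hf : List.filter (fun k => !(k == key)) (h :: t)
          = h :: List.filter (fun k => !(k == key)) t := by simp [hhk]
      rw [hf]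
      by_cases hha : h = after_key
      · subst hha
        rw [PySem.List.index?_cons_self, Option.getD_some]
        rw [PySem.List.insert_natCast _ 1 _ (by simp)]
        simp only [List.take_succ_cons, List.take_zero, List.drop_succ_cons, List.drop_zero]
        rw [List.flatMap_cons, show pvFk key h h = [h, key] by simp [pvFk]]
        rw [pvFlatMap_filter key h t hht]
        rfl
      · have hat : after_key ∈ t := by
          rcases List.mem_cons.mp hmem with e | m
          · exact absurd e.symm hha
          · exact m
        have hmf : after_key ∈ t.filter (fun k => !(k == key)) := by
          simp [List.mem_filter, hat, hne.symm]
        obtain ⟨i, hi⟩ := Option.isSome_iff_exists.mp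
          ((PySem.List.index?_isSome_iff _ _).mpr hmf)
        have hlen : i < (t.filter (fun k => !(k == key))).length := by
          obtain ⟨hk, _, _⟩ := PySem.List.getElem_of_index?_eq_some hi
          exact hk
        rw [PySem.List.index?_cons_of_ne _ (by simpa using hha), hi]
        simp only [Option.map_some, Option.getD_some]
        rw [PySem.List.insert_natCast _ (i + 1 + 1) _ (by simp; omega)]
        simp only [List.take_succ_cons, List.drop_succ_cons]
        rw [List.flatMap_cons, show pvFk key after_key h = [h] by simp [pvFk, hha, hhk]]
        have hrec := ih hndt hat
        rw [hi] at hrec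
        simp only [Option.getD_some] at hrec
        rw [PySem.List.insert_natCast _ (i + 1) _ (by omega)] at hrec
        simp only [List.cons_append]
        rw [hrec]
        simp

-- reconstructing the pairs from the key list gives back the original list (nodup keys)
theorem pvReconstruct (l : List (String × String)) (hnd : (l.map Prod.fst).Nodup) :
    (l.map Prod.fst).map (fun k => (k, (PySem.Dict.mk l).getD k "")) = l := by
  rw [List.map_map]
  have : ∀ p ∈ l, (fun k => (k, (PySem.Dict.mk l).getD k "")) (Prod.fst p) = p := by
    intro p hp
    have hget : (PySem.Dict.mk l).get? p.1 = some p.2 :=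
      PySem.Dict.get?_of_mem_items _ (by simpa using hp) (by simpa [PySem.Dict.keys] using hnd)
    simp [PySem.Dict.getD_of_get?_eq_some _ _ hget]
  calc l.map _ = l.map id := List.map_congr_left this
    _ = l := List.map_id l

-- A's fold when key = after_key: a plain identity rebuild of the dict.
theorem pvFoldA_eq (od : PySem.Dict String String) (key : String) :
    ∀ (l : List String) (acc : PySem.Dict String String), l.Nodup →
      (∀ k ∈ l, k ∉ acc.keys) →
      (l.foldl (fun new_dict k =>
          if k == key then
            (new_dict.insert k (od.getD k "")).insert key (od.getD key "")
          else if k == key then new_dict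
          else new_dict.insert k (od.getD k "")) acc).items
        = acc.items ++ l.map (fun k => (k, od.getD k "")) := by
  intro l
  induction l with
  | nil => intro acc _ _; simp
  | cons h t ih =>
    intro acc hnd hd
    have hndt : t.Nodup := hnd.of_cons
    have hht : h ∉ t := (List.nodup_cons.mp hnd).1
    have hhm : h ∉ acc.keys := hd h (by simp)
    have hc1 : acc.contains h = false := by
      cases hc : acc.contains h
      · rfl
      · exact absurd ((PySem.Dict.contains_iff_mem_keys _ _).mp hc) hhm
    have hi1 : (acc.insert h (od.getD h "")).items = acc.items ++ [(h, od.getD h "")] :=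
      PySem.Dict.items_insert_of_not_contains _ _ hc1
    have hk1 : (acc.insert h (od.getD h "")).keys = acc.keys ++ [h] := by
      simp [PySem.Dict.keys, hi1]
    by_cases hhk : h = key
    · subst hhk
      have hc2 : (acc.insert h (od.getD h "")).contains h = true := by
        rw [PySem.Dict.contains_iff_mem_keys, hk1]; simp
      have hi2 : ((acc.insert h (od.getD h "")).insert h (od.getD h "")).items
          = acc.items ++ [(h, od.getD h "")] := by
        rw [PySem.Dict.items_insert_of_contains _ _ hc2, hi1, List.map_append]
        congr 1
        · calc List.map _ acc.items
              = List.map id acc.items := List.map_congr_left (fun p hp => by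
                  have hpe : p.1 ≠ h := by
                    intro e
                    apply hhm
                    have hm : p.1 ∈ acc.items.map Prod.fst :=
                      List.mem_map_of_mem (f := Prod.fst) hp
                    rw [e] at hm
                    simpa [PySem.Dict.keys] using hm
                  simp [hpe])
            _ = acc.items := List.map_id _
        · simp
      have hk2 : ((acc.insert h (od.getD h "")).insert h (od.getD h "")).keys
          = acc.keys ++ [h] := by simp [PySem.Dict.keys, hi2]
      rw [List.foldl_cons, if_pos (by simp)]
      rw [ih _ hndt
        (by intro k hkt
            rw [hk2]
            simp only [List.mem_append, List.mem_singleton, not_or]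
            exact ⟨hd k (by simp [hkt]), fun e => hht (e ▸ hkt)⟩), hi2]
      simp
    · rw [List.foldl_cons, if_neg (by simpa using hhk), if_neg (by simpa using hhk)]
      rw [ih _ hndt
        (by intro k hkt
            rw [hk1]
            simp only [List.mem_append, List.mem_singleton, not_or]
            exact ⟨hd k (by simp [hkt]), fun e => hht (e ▸ hkt)⟩), hi1]
      simp

-- ===== VERDICT (by name: the statement is the Claim_ definition above) =====
theorem dict_change_place_spec : Claim_equal_dict_change_place := by
  intro old_dict key after_key _hdom hpre
  obtain ⟨hkey, hak, hnd⟩ := hpre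
  unfold Spec_dict_change_place dict_change_place dict_change_place_alt
  simp only
  have hkeys : (PySem.Dict.mk old_dict).keys = old_dict.map Prod.fst := by
    simp [PySem.Dict.keys]
  by_cases heq : key = after_key
  · subst heq
    rw [if_pos (by simp)]
    rw [hkeys]
    rw [pvFoldA_eq (PySem.Dict.mk old_dict) key (old_dict.map Prod.fst)
      PySem.Dict.empty hnd (by simp [PySem.Dict.keys, PySem.Dict.empty])]
    rw [show (PySem.Dict.empty : PySem.Dict String String).items = [] from rfl, List.nil_append]
    exact pvReconstruct old_dict hnd
  · rw [if_neg (by simpa using heq)]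
    rw [hkeys]
    rw [pvFoldA (PySem.Dict.mk old_dict) key after_key heq (old_dict.map Prod.fst)
      PySem.Dict.empty hnd
      (by simp [PySem.Dict.keys, PySem.Dict.empty])
      (by simp [PySem.Dict.keys, PySem.Dict.empty])]
    rw [show (PySem.Dict.empty : PySem.Dict String String).items = [] from rfl, List.nil_append]
    rw [pvKeyList key after_key heq (old_dict.map Prod.fst) hnd hak]
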